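-- pv_equiv track=rewrite | github.com/LiZhouSama/IMUHOI_paper | vis_IMUHOI.py | _normalize_overlay_frames
-- ===== SOURCE A (Python) =====
-- def _normalize_overlay_frames(frame_ids, total_frames):
--     if frame_ids is None:
--         return None
--     if total_frames <= 0:
--         raise SystemExit(f"Invalid sequence length: {total_frames}")
--
--     unique_ids = []
--     seen = set()
--     invalid = []
--     for raw_idx in frame_ids:
--         idx = int(raw_idx)
--         if idx in seen:
--             continue
--         seen.add(idx)
--         if idx < 0 or idx >= total_frames:
--             invalid.append(idx)
--         else:
--             unique_ids.append(idx)
--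
--     if invalid:
--         raise SystemExit(
--             f"Invalid --overlay_frames: {invalid}. "
--             f"Valid frame range is [0, {total_frames - 1}]."
--         )
--     if not unique_ids:
--         raise SystemExit("No valid frame index found in --overlay_frames.")
--     return unique_ids
-- ===== SOURCE B (Python) =====
-- def _normalize_overlay_frames(frame_ids, total_frames):
--     if frame_ids is None:
--         return None
--     if total_frames <= 0:
--         raise SystemExit(f"Invalid sequence length: {total_frames}")
--
--     ids = [int(x) for x in frame_ids]
--     bad = [i for i in ids if i < 0 or i >= total_frames]
--     if bad:
--         raise SystemExit(
--             f"Invalid --overlay_frames: {bad}. "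
--             f"Valid frame range is [0, {total_frames - 1}]."
--         )
--     if not ids:
--         raise SystemExit("No valid frame index found in --overlay_frames.")
--     return [x for k, x in enumerate(ids) if x not in ids[:k]]
-- ===== Notes on version B (the rewrite author's own statement) =====
-- stated objective: simpler
-- what changed: A's fused single scan maintaining a seen-set and three accumulators is replaced by staged passes: a whole-list range check, then order-preserving dedup by brute-force membership of each element in its own prefix (no auxiliary set at all).
import Mathlib
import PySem

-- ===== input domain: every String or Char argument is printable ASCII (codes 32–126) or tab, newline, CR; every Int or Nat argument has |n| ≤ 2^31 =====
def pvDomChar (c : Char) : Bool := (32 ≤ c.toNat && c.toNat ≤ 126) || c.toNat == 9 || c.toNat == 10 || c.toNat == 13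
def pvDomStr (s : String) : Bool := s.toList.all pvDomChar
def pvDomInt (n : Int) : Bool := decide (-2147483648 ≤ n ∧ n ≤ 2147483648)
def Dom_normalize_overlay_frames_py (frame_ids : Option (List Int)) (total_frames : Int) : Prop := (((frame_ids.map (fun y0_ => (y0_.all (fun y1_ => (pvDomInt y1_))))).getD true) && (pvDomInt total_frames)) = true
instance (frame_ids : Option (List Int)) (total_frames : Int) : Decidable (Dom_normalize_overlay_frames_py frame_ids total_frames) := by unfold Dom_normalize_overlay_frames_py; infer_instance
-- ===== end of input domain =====

-- B replaces A's fused single scan (seen-set + three accumulators) by staged passes: a whole-list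
-- range check, then order-preserving dedup by membership of each element in its own prefix;
-- objective: simpler (B is quadratic, A linear). A raises SystemExit on non-positive total_frames,
-- out-of-range indices or an empty list — those inputs are excluded by Pre_.


-- ===== PORT A =====
-- one iteration of A's loop over the state (unique_ids, seen, invalid); int(raw_idx) is the identity on Int
def stepA (total_frames : Int) (st : List Int × PySem.Set Int × List Int) (raw_idx : Int) :
    List Int × PySem.Set Int × List Int :=
  if PySem.Set.contains st.2.1 raw_idx then st
  else
    if raw_idx < 0 ∨ total_frames ≤ raw_idx then (st.1, PySem.Set.add st.2.1 raw_idx, st.2.2 ++ [raw_idx])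
    else (st.1 ++ [raw_idx], PySem.Set.add st.2.1 raw_idx, st.2.2)

-- the guard cascade after A's loop
def finishA (st : List Int × PySem.Set Int × List Int) : Option (List Int) :=
  if !st.2.2.isEmpty then none       -- raise SystemExit (excluded by Pre_)
  else if st.1.isEmpty then none     -- raise SystemExit (excluded by Pre_)
  else some st.1

def normalize_overlay_frames_py (frame_ids : Option (List Int)) (total_frames : Int) : Option (List Int) :=
  match frame_ids with
  | none => none
  | some xs =>
    if total_frames ≤ 0 then none    -- raise SystemExit (excluded by Pre_)
    else finishA (xs.foldl (stepA total_frames) ([], PySem.Set.empty, []))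

-- ===== PORT B =====
def normalize_overlay_frames_py_alt (frame_ids : Option (List Int)) (total_frames : Int) : Option (List Int) :=
  match frame_ids with
  | none => none
  | some ids =>                      -- ids = [int(x) for x in frame_ids]: identity on Int
    if total_frames ≤ 0 then none    -- raise SystemExit (excluded by Pre_)
    else
      -- bad = [i for i in ids if i < 0 or i >= total_frames]
      if !(ids.filter (fun i => decide (i < 0) || decide (total_frames ≤ i))).isEmpty then
        none                         -- raise SystemExit on non-empty bad (excluded by Pre_)
      else if ids.isEmpty then
        none                         -- raise SystemExit on empty ids (excluded by Pre_)
      else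
        -- [x for k, x in enumerate(ids) if x not in ids[:k]]
        some (((PySem.List.enumerate ids 0).filter
                (fun p => !(PySem.List.slice ids none (some p.1)).contains p.2)).map Prod.snd)

-- ===== PRECONDITION & SPEC =====
-- Pre_ admits exactly the inputs on which Python A returns normally: frame_ids is None, or
-- total_frames is positive, the list is non-empty and every index lies in [0, total_frames);
-- elsewhere A (and B) raise SystemExit.
def Pre_normalize_overlay_frames_py (frame_ids : Option (List Int)) (total_frames : Int) : Prop :=
  (match frame_ids with
   | none => true
   | some xs => decide (0 < total_frames) && !xs.isEmpty
                && xs.all (fun x => decide (0 ≤ x) && decide (x < total_frames))) = true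
instance (frame_ids : Option (List Int)) (total_frames : Int) : Decidable (Pre_normalize_overlay_frames_py frame_ids total_frames) := by unfold Pre_normalize_overlay_frames_py; infer_instance

def pvWitness_normalize_overlay_frames_py : Option (List Int) × Int := (some [0, 2, 2, 1], 3)

def Spec_normalize_overlay_frames_py (frame_ids : Option (List Int)) (total_frames : Int) (out : Option (List Int)) : Prop := out = normalize_overlay_frames_py_alt frame_ids total_frames
instance (frame_ids : Option (List Int)) (total_frames : Int) (out : Option (List Int)) : Decidable (Spec_normalize_overlay_frames_py frame_ids total_frames out) := by unfold Spec_normalize_overlay_frames_py; infer_instance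

-- ===== CLAIM (what is proved, stated in full; the proofs are below) =====
def Claim_equal_normalize_overlay_frames_py : Prop := ∀ (frame_ids : Option (List Int)) (total_frames : Int), Dom_normalize_overlay_frames_py frame_ids total_frames → Pre_normalize_overlay_frames_py frame_ids total_frames → Spec_normalize_overlay_frames_py frame_ids total_frames (normalize_overlay_frames_py frame_ids total_frames)

-- ===== LEMMAS AND PROOFS =====

-- A's loop, when every element is in range, never touches `invalid`, and grows unique_ids in
-- lockstep with the seen-set's element list.
lemma loopA_in_range (total_frames : Int) (xs : List Int)
    (h : ∀ x ∈ xs, 0 ≤ x ∧ x < total_frames) (s : PySem.Set Int) :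
    xs.foldl (stepA total_frames) (s, s, []) =
      (PySem.Set.update s xs, PySem.Set.update s xs, []) := by
  induction xs generalizing s with
  | nil => simp [PySem.Set.update]
  | cons x xs ih =>
    have hx := h x (by simp)
    have hxs : ∀ y ∈ xs, 0 ≤ y ∧ y < total_frames := fun y hy => h y (by simp [hy])
    have hni : ¬ (x < 0 ∨ total_frames ≤ x) := by omega
    by_cases hc : x ∈ s
    · simpa [List.foldl_cons, stepA, hc, hni, PySem.Set.update, PySem.Set.add,
        PySem.Set.contains] using ih hxs s
    · simpa [List.foldl_cons, stepA, hc, hni, PySem.Set.update, PySem.Set.add,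
        PySem.Set.contains] using ih hxs (s ++ [x])

-- B's prefix-membership dedup, run over the tail `xs` of L = pre ++ xs with a seen-set s holding
-- exactly pre's elements, appends to s precisely the first occurrences among xs.
lemma dedupB_aux (L : List Int) :
    ∀ (xs pre : List Int) (s : PySem.Set Int), L = pre ++ xs →
      (∀ a : Int, (a ∈ s) ↔ (a ∈ pre)) →
      PySem.Set.update s xs =
        s ++ ((PySem.List.enumerate xs (pre.length : Int)).filter
                (fun p => !(PySem.List.slice L none (some p.1)).contains p.2)).map Prod.snd := by
  intro xs
  induction xs with
  | nil => intro pre s _ _; simp [PySem.Set.update, PySem.List.enumerate]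
  | cons x t ih =>
    intro pre s hL hs
    have htake : PySem.List.slice L none (some (pre.length : Int)) = pre := by
      rw [PySem.List.slice_to_natCast, hL, List.take_left]
    have hcond : (!(PySem.List.slice L none (some ((pre.length : Nat) : Int))).contains x)
        = !(decide (x ∈ pre)) := by
      rw [htake]; simp
    by_cases hx : x ∈ pre
    · have hxs : x ∈ s := (hs x).2 hx
      have hupd : PySem.Set.update s (x :: t) = PySem.Set.update s t := by
        simp [PySem.Set.update, PySem.Set.add, PySem.Set.contains, hxs]
      have hpre' : L = (pre ++ [x]) ++ t := by simp [hL]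
      have hs' : ∀ a : Int, (a ∈ s) ↔ (a ∈ pre ++ [x]) := by
        intro a; rw [hs a]
        constructor
        · intro h; exact List.mem_append_left _ h
        · intro h; rcases List.mem_append.1 h with h | h
          · exact h
          · simp at h; subst h; exact hx
      have := ih (pre ++ [x]) s hpre' hs'
      rw [PySem.List.enumerate_cons, List.filter_cons, hcond]
      simp only [hx, decide_true, Bool.not_true, if_neg (by simp : ¬ (false = true))]
      rw [hupd, this]
      congr 2
      simp
    · have hxs : x ∉ s := fun h => hx ((hs x).1 h)
      have hupd : PySem.Set.update s (x :: t) = PySem.Set.update (s ++ [x]) t := by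
        simp [PySem.Set.update, PySem.Set.add, PySem.Set.contains, hxs]
      have hpre' : L = (pre ++ [x]) ++ t := by simp [hL]
      have hs' : ∀ a : Int, (a ∈ s ++ [x]) ↔ (a ∈ pre ++ [x]) := by
        intro a; simp [hs a]
      have := ih (pre ++ [x]) (s ++ [x]) hpre' hs'
      rw [PySem.List.enumerate_cons, List.filter_cons, hcond]
      simp only [hx, decide_false, Bool.not_false]
      rw [hupd, this]
      simp

-- with pre = [] and s = ∅: B's comprehension computes exactly the keep-first dedup of ids
lemma dedupB_eq (ids : List Int) :
    ((PySem.List.enumerate ids 0).filter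
        (fun p => !(PySem.List.slice ids none (some p.1)).contains p.2)).map Prod.snd
      = PySem.Set.update ([] : PySem.Set Int) ids := by
  have := dedupB_aux ids ids [] ([] : PySem.Set Int) (by simp) (by simp)
  simpa using this.symm

-- ===== VERDICT (by name: the statement is the Claim_ definition above) =====
theorem normalize_overlay_frames_py_spec : Claim_equal_normalize_overlay_frames_py := by
  intro frame_ids total_frames _hdom hpre
  unfold Spec_normalize_overlay_frames_py
  rcases frame_ids with _ | xs
  · rfl
  · unfold Pre_normalize_overlay_frames_py at hpre
    simp only [decide_eq_true_eq, List.all_eq_true, Bool.and_eq_true, Bool.not_eq_true'] at hpre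
    obtain ⟨⟨htf, hne⟩, hall⟩ := hpre
    have hbad : xs.filter (fun i => decide (i < 0) || decide (total_frames ≤ i)) = [] := by
      rw [List.filter_eq_nil_iff]
      intro a ha
      have := hall a ha
      simp; omega
    show normalize_overlay_frames_py (some xs) total_frames
        = normalize_overlay_frames_py_alt (some xs) total_frames
    simp only [normalize_overlay_frames_py, normalize_overlay_frames_py_alt]
    rw [if_neg (show ¬ total_frames ≤ 0 by omega), if_neg (show ¬ total_frames ≤ 0 by omega),
      show (PySem.Set.empty : PySem.Set Int) = [] from rfl,
      loopA_in_range total_frames xs hall [], hbad, dedupB_eq]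
    have hxs : xs ≠ [] := by simpa using hne
    have hnonempty : PySem.Set.update ([] : PySem.Set Int) xs ≠ [] := by
      rcases xs with _ | ⟨x, t⟩
      · exact absurd rfl hxs
      · intro h
        have : x ∈ PySem.Set.update ([] : PySem.Set Int) (x :: t) :=
          (PySem.Set.mem_update _ _ _).2 (Or.inr (by simp))
        rw [h] at this; exact absurd this (by simp)
    simp [finishA, List.isEmpty_iff, hnonempty, hxs]
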